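-- pv_equiv track=rewrite | github.com/vibhamishra09/AI-Powered-classroom | app.py | qna_summary_from_items
-- ===== SOURCE A (Python) =====
-- from typing import Dict, Any, List, Tuple, Optional
--
-- def qna_summary_from_items(items: List[dict], visual_data: Optional[Dict[str, Any]] = None) -> Dict[str, Any]:
--     total_stu = sum(1 for it in items if (it.get("speaker") or "").lower() == "student")
--     total_tea = sum(1 for it in items if (it.get("speaker") or "").lower() == "teacher")
--     uniq_students = len({(it.get("student_id") or "").lower()
--                          for it in items if (it.get("speaker") or "").lower()=="student" and it.get("student_id")})
--     answered_est = sum(1 for it in items if (it.get("speaker") or "").lower()=="student" and bool(it.get("answered")))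
--
--     hand_raises = 0
--     if visual_data:
--         # We can use the total unique estimate or just the event count
--         hand_raises = visual_data.get("hand_raise_unique", 0) or len(visual_data.get("hand_raise_events", []))
--
--     return {
--         "total_items": len(items),
--         "total_student_questions": total_stu,
--         "total_teacher_questions": total_tea,
--         "unique_students_est": uniq_students,
--         "answered": answered_est,
--         "unanswered": max(total_stu - answered_est, 0),
--         "hand_raises": hand_raises
--     }
-- ===== SOURCE B (Python) =====
-- def qna_summary_from_items(items, visual_data=None):
--     stu = tea = ans = 0
--     seen = set()
--     for it in items:
--         sp = (it.get("speaker") or "").lower()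
--         if sp == "student":
--             stu += 1
--             sid = it.get("student_id")
--             if sid:
--                 seen.add(sid.lower())
--             if it.get("answered"):
--                 ans += 1
--         elif sp == "teacher":
--             tea += 1
--     hand_raises = 0
--     if visual_data:
--         hand_raises = visual_data.get("hand_raise_unique", 0) or len(visual_data.get("hand_raise_events", []))
--     return {
--         "total_items": len(items),
--         "total_student_questions": stu,
--         "total_teacher_questions": tea,
--         "unique_students_est": len(seen),
--         "answered": ans,
--         "unanswered": max(stu - ans, 0),
--         "hand_raises": hand_raises,
--     }
-- ===== Notes on version B (the rewrite author's own statement) =====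
-- stated objective: alternative
-- what changed: Replaced four independent comprehension scans (each re-normalizing the speaker) with one loop that normalizes the speaker once per item and updates four accumulators (student count, teacher count, seen-id set, answered count).
import Mathlib
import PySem

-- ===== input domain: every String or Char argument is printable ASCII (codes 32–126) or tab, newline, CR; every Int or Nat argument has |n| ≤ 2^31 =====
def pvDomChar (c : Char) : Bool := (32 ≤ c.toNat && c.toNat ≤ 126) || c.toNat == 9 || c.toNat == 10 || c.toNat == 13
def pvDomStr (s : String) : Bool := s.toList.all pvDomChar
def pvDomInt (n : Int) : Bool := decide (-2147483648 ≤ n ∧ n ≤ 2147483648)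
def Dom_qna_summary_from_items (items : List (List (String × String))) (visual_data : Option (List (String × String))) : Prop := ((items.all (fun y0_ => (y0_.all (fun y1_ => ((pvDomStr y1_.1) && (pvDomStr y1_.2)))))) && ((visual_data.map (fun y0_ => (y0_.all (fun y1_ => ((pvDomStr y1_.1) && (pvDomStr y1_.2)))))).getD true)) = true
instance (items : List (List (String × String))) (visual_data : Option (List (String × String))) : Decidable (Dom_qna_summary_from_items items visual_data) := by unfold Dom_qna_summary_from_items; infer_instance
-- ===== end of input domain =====

-- B replaces A's four independent scans over `items` by one accumulator loop that
-- normalizes the speaker once per item and updates four accumulators (alternative decomposition, same cost).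


-- ===== PORT A =====
-- (it.get(k) or "") : absent key and "" both normalize to ""
def pvGetStr (it : List (String × String)) (k : String) : String :=
  (PySem.Dict.get? (PySem.Dict.mk it) k).getD ""

-- (it.get("speaker") or "").lower()
def pvSpeakerOf (it : List (String × String)) : String :=
  PySem.Str.lower (pvGetStr it "speaker")

-- hand_raises = visual_data.get("hand_raise_unique", 0) or len(visual_data.get("hand_raise_events", []))
-- (when 'hand_raise_unique' is present non-empty, Python yields that STRING — outside Pre_, the port returns 0 there)
def pvHandRaises (visual_data : Option (List (String × String))) : Int :=
  match visual_data with
  | none => 0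
  | some vd =>
    if vd.isEmpty then 0
    else if pvGetStr vd "hand_raise_unique" != "" then 0
    else PySem.Str.len (pvGetStr vd "hand_raise_events")

def qna_summary_from_items (items : List (List (String × String))) (visual_data : Option (List (String × String))) : List (String × Int) :=
  let total_stu : Int := (items.countP (fun it => pvSpeakerOf it == "student") : Int)
  let total_tea : Int := (items.countP (fun it => pvSpeakerOf it == "teacher") : Int)
  let uniq_students : Int :=
    ((PySem.Set.ofList ((items.filter (fun it => pvSpeakerOf it == "student" && pvGetStr it "student_id" != "")).map
      (fun it => PySem.Str.lower (pvGetStr it "student_id")))).length : Int)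
  let answered_est : Int := (items.countP (fun it => pvSpeakerOf it == "student" && pvGetStr it "answered" != "") : Int)
  let hand_raises : Int := pvHandRaises visual_data
  [("total_items", (items.length : Int)),
   ("total_student_questions", total_stu),
   ("total_teacher_questions", total_tea),
   ("unique_students_est", uniq_students),
   ("answered", answered_est),
   ("unanswered", max (total_stu - answered_est) 0),
   ("hand_raises", hand_raises)]

-- ===== PORT B =====
-- one loop step over (stu, tea, seen, ans)
def pvStep (acc : Int × Int × PySem.Set String × Int) (it : List (String × String)) : Int × Int × PySem.Set String × Int :=
  let (stu, tea, seen, ans) := acc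
  let sp := PySem.Str.lower ((PySem.Dict.get? (PySem.Dict.mk it) "speaker").getD "")
  if sp == "student" then
    let seen' :=
      match PySem.Dict.get? (PySem.Dict.mk it) "student_id" with
      | some sid => if sid != "" then PySem.Set.add seen (PySem.Str.lower sid) else seen
      | none => seen
    let ans' := if ((PySem.Dict.get? (PySem.Dict.mk it) "answered").getD "") != "" then ans + 1 else ans
    (stu + 1, tea, seen', ans')
  else if sp == "teacher" then (stu, tea + 1, seen, ans)
  else (stu, tea, seen, ans)

def qna_summary_from_items_alt (items : List (List (String × String))) (visual_data : Option (List (String × String))) : List (String × Int) :=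
  let (stu, tea, seen, ans) := items.foldl pvStep (0, 0, PySem.Set.empty, 0)
  let hand_raises : Int := pvHandRaises visual_data
  [("total_items", (items.length : Int)),
   ("total_student_questions", stu),
   ("total_teacher_questions", tea),
   ("unique_students_est", (seen.length : Int)),
   ("answered", ans),
   ("unanswered", max (stu - ans) 0),
   ("hand_raises", hand_raises)]

-- ===== PRECONDITION & SPEC =====
-- Pre_ excludes inputs where visual_data carries a non-empty 'hand_raise_unique' string: there Python A
-- returns that STRING in 'hand_raises', a value outside the declared int type, unrepresentable in the port.
def Pre_qna_summary_from_items (items : List (List (String × String))) (visual_data : Option (List (String × String))) : Prop :=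
  visual_data.all (fun vd => (PySem.Dict.get? (PySem.Dict.mk vd) "hand_raise_unique").getD "" == "") = true
instance (items : List (List (String × String))) (visual_data : Option (List (String × String))) : Decidable (Pre_qna_summary_from_items items visual_data) := by unfold Pre_qna_summary_from_items; infer_instance

def pvWitness_qna_summary_from_items : (List (List (String × String))) × (Option (List (String × String))) :=
  ([[("speaker", "Student"), ("student_id", "A1"), ("answered", "y")], [("speaker", "teacher")]],
   some [("hand_raise_events", "abc")])

def Spec_qna_summary_from_items (items : List (List (String × String))) (visual_data : Option (List (String × String))) (out : List (String × Int)) : Prop := out = qna_summary_from_items_alt items visual_data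
instance (items : List (List (String × String))) (visual_data : Option (List (String × String))) (out : List (String × Int)) : Decidable (Spec_qna_summary_from_items items visual_data out) := by unfold Spec_qna_summary_from_items; infer_instance

-- ===== CLAIM (what is proved, stated in full; the proofs are below) =====
def Claim_equal_qna_summary_from_items : Prop := ∀ (items : List (List (String × String))) (visual_data : Option (List (String × String))), Dom_qna_summary_from_items items visual_data → Pre_qna_summary_from_items items visual_data → Spec_qna_summary_from_items items visual_data (qna_summary_from_items items visual_data)

-- ===== LEMMAS AND PROOFS =====
theorem pvStep_eq (acc : Int × Int × PySem.Set String × Int) (it : List (String × String)) :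
    pvStep acc it =
      (acc.1 + (if pvSpeakerOf it == "student" then 1 else 0),
       acc.2.1 + (if pvSpeakerOf it == "teacher" then 1 else 0),
       (if pvSpeakerOf it == "student" && pvGetStr it "student_id" != "" then
          PySem.Set.add acc.2.2.1 (PySem.Str.lower (pvGetStr it "student_id")) else acc.2.2.1),
       acc.2.2.2 + (if pvSpeakerOf it == "student" && pvGetStr it "answered" != "" then 1 else 0)) := by
  obtain ⟨stu, tea, seen, ans⟩ := acc
  by_cases hs : pvSpeakerOf it = "student"
  · have ht : pvSpeakerOf it ≠ "teacher" := by rw [hs]; decide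
    rcases hσ : PySem.Dict.get? (PySem.Dict.mk it) "student_id" with _ | sid
    · by_cases ha : pvGetStr it "answered" = "" <;>
        simp_all [pvStep, pvSpeakerOf, pvGetStr]
    · by_cases ha : pvGetStr it "answered" = "" <;>
        by_cases hd : sid = "" <;>
          simp_all [pvStep, pvSpeakerOf, pvGetStr]
  · by_cases ht : pvSpeakerOf it = "teacher" <;>
      simp_all [pvStep, pvSpeakerOf, pvGetStr]

theorem pvStep_loop (l : List (List (String × String))) (stu tea ans : Int) (seen : PySem.Set String) :
    l.foldl pvStep (stu, tea, seen, ans) =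
      (stu + (l.countP (fun it => pvSpeakerOf it == "student") : Int),
       tea + (l.countP (fun it => pvSpeakerOf it == "teacher") : Int),
       PySem.Set.update seen ((l.filter (fun it => pvSpeakerOf it == "student" && pvGetStr it "student_id" != "")).map
         (fun it => PySem.Str.lower (pvGetStr it "student_id"))),
       ans + (l.countP (fun it => pvSpeakerOf it == "student" && pvGetStr it "answered" != "") : Int)) := by
  induction l generalizing stu tea ans seen with
  | nil => simp [PySem.Set.update]
  | cons it rest ih =>
    rw [List.foldl_cons, pvStep_eq, ih]
    refine Prod.ext ?_ (Prod.ext ?_ (Prod.ext ?_ ?_)) <;>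
      simp only [List.countP_cons, List.filter_cons]
    · split_ifs <;> push_cast <;> ring
    · split_ifs <;> push_cast <;> ring
    · split_ifs with h
      · rw [List.map_cons, PySem.Set.update_cons]
      · rfl
    · split_ifs <;> push_cast <;> ring

-- ===== VERDICT (by name: the statement is the Claim_ definition above) =====
theorem qna_summary_from_items_spec : Claim_equal_qna_summary_from_items := by
  intro items visual_data _ _
  unfold Spec_qna_summary_from_items qna_summary_from_items qna_summary_from_items_alt
  rw [pvStep_loop]
  simp [PySem.Set.empty, PySem.Set.update_nil_left]
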